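-- pv_equiv track=rewrite | github.com/gaviral/pre_bunker_health_communications_system | agent-project/src/orchestration/risk_reporter.py | _summarize_evidence
-- ===== SOURCE A (Python) =====
-- from typing import Dict, List, Any
--
-- def _summarize_evidence(evidence: List[Dict[str, Any]]) -> str:
--     """Summarize evidence validation for LLM context"""
--     if not evidence:
--         return "No evidence validation available"
--
--     supported = len([e for e in evidence if e.get('validation_status') == 'well_supported'])
--     moderate = len([e for e in evidence if e.get('validation_status') == 'moderately_supported'])
--     limited = len([e for e in evidence if e.get('validation_status') == 'limited_support'])
--
--     return f"""
--     Total validations: {len(evidence)}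
--     Well supported: {supported}
--     Moderately supported: {moderate}
--     Limited support: {limited}
--     """
-- ===== SOURCE B (Python) =====
-- def _summarize_evidence(evidence):
--     """Summarize evidence validation (one pass with a 3-tuple accumulator, lines joined)."""
--     if not evidence:
--         return "No evidence validation available"
--
--     w, m, l = 0, 0, 0
--     for e in evidence:
--         s = e.get('validation_status')
--         w += (s == 'well_supported')
--         m += (s == 'moderately_supported')
--         l += (s == 'limited_support')
--
--     lines = [
--         "Total validations: " + str(len(evidence)),
--         "Well supported: " + str(w),
--         "Moderately supported: " + str(m),
--         "Limited support: " + str(l),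
--     ]
--     return "\n    " + "\n    ".join(lines) + "\n    "
-- ===== Notes on version B (the rewrite author's own statement) =====
-- stated objective: alternative
-- what changed: Replaces A's three separate filtering passes and inline f-string with one structural recursion carrying a 3-tuple of counts, and assembles the result by joining a list of lines.
import Mathlib
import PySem

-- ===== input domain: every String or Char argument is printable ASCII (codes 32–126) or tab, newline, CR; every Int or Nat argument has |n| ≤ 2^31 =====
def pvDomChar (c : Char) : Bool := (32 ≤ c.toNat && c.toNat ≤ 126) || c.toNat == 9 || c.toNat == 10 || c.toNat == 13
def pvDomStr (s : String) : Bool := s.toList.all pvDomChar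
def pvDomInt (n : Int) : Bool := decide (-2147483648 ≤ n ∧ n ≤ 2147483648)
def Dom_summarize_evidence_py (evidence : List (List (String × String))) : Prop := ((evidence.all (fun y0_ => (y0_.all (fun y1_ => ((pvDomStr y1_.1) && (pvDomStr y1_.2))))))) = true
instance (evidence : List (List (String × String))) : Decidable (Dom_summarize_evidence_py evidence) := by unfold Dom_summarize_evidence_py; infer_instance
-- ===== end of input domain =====

-- B replaces A's three filtering passes with one loop carrying a 3-tuple of counts and joins the lines (alternative decomposition, same cost class).

-- e.get('validation_status')  (shared Python semantics of dict lookup, used by both ports)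
def pvGetVS (e : List (String × String)) : Option String :=
  (PySem.Dict.mk e).get? "validation_status"

-- ===== PORT A =====
def summarize_evidence_py (evidence : List (List (String × String))) : String :=
  if evidence = [] then "No evidence validation available"
  else
    let supported : Int := (evidence.filter (fun e => pvGetVS e == some "well_supported")).length
    let moderate : Int := (evidence.filter (fun e => pvGetVS e == some "moderately_supported")).length
    let limited : Int := (evidence.filter (fun e => pvGetVS e == some "limited_support")).length
    "\n    Total validations: " ++ PySem.Int.toStr (evidence.length : Int) ++
    "\n    Well supported: " ++ PySem.Int.toStr supported ++
    "\n    Moderately supported: " ++ PySem.Int.toStr moderate ++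
    "\n    Limited support: " ++ PySem.Int.toStr limited ++ "\n    "

-- ===== PORT B =====
-- Source B's single loop: one pass, 3-tuple accumulator
def pvCount3 (evidence : List (List (String × String))) : Int × Int × Int :=
  evidence.foldl
    (fun (acc : Int × Int × Int) e =>
      let (w, m, l) := acc
      let s := pvGetVS e
      (w + (if s == some "well_supported" then 1 else 0),
       m + (if s == some "moderately_supported" then 1 else 0),
       l + (if s == some "limited_support" then 1 else 0)))
    (0, 0, 0)

def summarize_evidence_py_alt (evidence : List (List (String × String))) : String :=
  if evidence = [] then "No evidence validation available"
  else
    let (w, m, l) := pvCount3 evidence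
    let lines : List String :=
      [ "Total validations: " ++ PySem.Int.toStr (evidence.length : Int)
      , "Well supported: " ++ PySem.Int.toStr w
      , "Moderately supported: " ++ PySem.Int.toStr m
      , "Limited support: " ++ PySem.Int.toStr l ]
    "\n    " ++ PySem.Str.join "\n    " lines ++ "\n    "

-- ===== PRECONDITION & SPEC =====
def Spec_summarize_evidence_py (evidence : List (List (String × String))) (out : String) : Prop := out = summarize_evidence_py_alt evidence
instance (evidence : List (List (String × String))) (out : String) : Decidable (Spec_summarize_evidence_py evidence out) := by unfold Spec_summarize_evidence_py; infer_instance

-- ===== CLAIM =====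
def Claim_equal_summarize_evidence_py : Prop := ∀ (evidence : List (List (String × String))), Dom_summarize_evidence_py evidence → Spec_summarize_evidence_py evidence (summarize_evidence_py evidence)

-- ===== LEMMAS AND PROOFS =====

-- generalized loop invariant for B's fold
theorem pvCount3_inv (evidence : List (List (String × String))) (w m l : Int) :
    evidence.foldl
      (fun (acc : Int × Int × Int) e =>
        let (w, m, l) := acc
        let s := pvGetVS e
        (w + (if s == some "well_supported" then 1 else 0),
         m + (if s == some "moderately_supported" then 1 else 0),
         l + (if s == some "limited_support" then 1 else 0)))
      (w, m, l)
    = (w + ((evidence.filter (fun e => pvGetVS e == some "well_supported")).length : Int),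
       m + ((evidence.filter (fun e => pvGetVS e == some "moderately_supported")).length : Int),
       l + ((evidence.filter (fun e => pvGetVS e == some "limited_support")).length : Int)) := by
  induction evidence generalizing w m l with
  | nil => simp
  | cons e rest ih =>
    simp only [List.foldl_cons, ih, List.filter_cons]
    split_ifs <;> simp_all <;> omega

-- B's tuple of counts equals A's three filter lengths.
theorem pvCount3_eq (evidence : List (List (String × String))) :
    pvCount3 evidence =
      (((evidence.filter (fun e => pvGetVS e == some "well_supported")).length : Int),
       ((evidence.filter (fun e => pvGetVS e == some "moderately_supported")).length : Int),
       ((evidence.filter (fun e => pvGetVS e == some "limited_support")).length : Int)) := by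
  unfold pvCount3
  simpa using pvCount3_inv evidence 0 0 0

-- sep.join on a four-element list, written out
theorem pv_join4 (sep a b c d : String) : PySem.Str.join sep [a, b, c, d] = a ++ sep ++ b ++ sep ++ c ++ sep ++ d := by
  simp [PySem.Str.join, PySem.Chars.join, String.ext_iff, String.toList_append, List.intercalate]

-- ===== VERDICT =====
theorem summarize_evidence_py_spec : Claim_equal_summarize_evidence_py := by
  intro evidence _
  unfold Spec_summarize_evidence_py summarize_evidence_py summarize_evidence_py_alt
  by_cases h : evidence = []
  · simp [h]
  · simp only [h, if_false, pvCount3_eq, pv_join4]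
    simp [String.ext_iff, String.toList_append]
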